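-- pv_equiv track=rewrite | github.com/Abs1201/Coding_Test | Coding_Test/Level2/구명보트.py | solution
-- ===== SOURCE A (Python) =====
-- def solution(people : list, limit : int):
--     answer = 0
--     people.sort(reverse=True)
--     while(len(people) > 0):
--         lim = limit
--         lim -= people[0]
--         del people[0]
--         while len(people) > 0 and people[-1] <= lim:
--             lim -= people[-1]
--             del people[-1]
--         answer += 1
--     return answer
-- ===== SOURCE B (Python) =====
-- def solution(people, limit):
--     arr = sorted(people, reverse=True)
--     lo, hi = 0, len(arr)
--     answer = 0
--     while lo < hi:
--         lim = limit - arr[lo]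
--         lo += 1
--         while lo < hi and arr[hi - 1] <= lim:
--             lim -= arr[hi - 1]
--             hi -= 1
--         answer += 1
--     return answer
-- ===== Notes on version B (the rewrite author's own statement) =====
-- stated objective: alternative
-- what changed: B sorts once and walks the sorted array with two index pointers (heavy from the front, light from the back) instead of repeatedly deleting elements from the list with del people[0] and del people[-1]; the deletion passes disappear.
import Mathlib
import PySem

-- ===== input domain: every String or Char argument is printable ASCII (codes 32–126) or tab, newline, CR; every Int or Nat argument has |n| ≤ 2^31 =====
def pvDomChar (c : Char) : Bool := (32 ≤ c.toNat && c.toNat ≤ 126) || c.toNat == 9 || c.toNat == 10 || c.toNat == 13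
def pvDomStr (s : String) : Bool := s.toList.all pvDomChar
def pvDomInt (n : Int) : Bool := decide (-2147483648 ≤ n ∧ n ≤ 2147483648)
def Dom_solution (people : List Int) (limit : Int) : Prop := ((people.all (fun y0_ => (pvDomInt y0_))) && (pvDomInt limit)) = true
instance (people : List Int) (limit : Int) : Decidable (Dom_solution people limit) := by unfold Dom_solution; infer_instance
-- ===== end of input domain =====

-- B replaces A's repeated `del` on a shrinking list by two index pointers over the
-- list sorted once (alternative algorithm, same measured cost). Note: the Python A
-- mutates `people` in place (sorts and empties it); the equivalence proved here is
-- about the return value only.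

-- ===== PORT A =====
-- inner while: `while len(people) > 0 and people[-1] <= lim: lim -= people[-1]; del people[-1]`
def aInner (l : List Int) (lim : Int) : List Int :=
  match h : l.getLast? with
  | some x => if x ≤ lim then aInner l.dropLast (lim - x) else l
  | none => l
termination_by l.length
decreasing_by
  have hne : l ≠ [] := by intro he; subst he; simp at h
  have : 0 < l.length := List.length_pos_iff.mpr hne
  simp [List.length_dropLast]; omega

theorem aInner_length (l : List Int) (lim : Int) : (aInner l lim).length ≤ l.length := by
  fun_induction aInner with
  | case1 l lim x h hx ih =>
      have hne : l ≠ [] := by intro he; subst he; simp at h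
      have : 0 < l.length := List.length_pos_iff.mpr hne
      have := List.length_dropLast (xs := l)
      omega
  | case2 => omega
  | case3 => omega

-- outer while: take people[0], pack from the back, count a boat
def aLoop (people : List Int) (limit : Int) (answer : Int) : Int :=
  match people with
  | [] => answer
  | p :: rest => aLoop (aInner rest (limit - p)) limit (answer + 1)
termination_by people.length
decreasing_by
  have := aInner_length rest (limit - p)
  simp; omega

def solution (people : List Int) (limit : Int) : Int :=
  aLoop (PySem.List.sorted people (fun x => x) true) limit 0

-- ===== PORT B =====
-- inner while of Source B; arr[hi-1] ported as getD (hi-1) 0 — the index is always in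
-- range when reached (lo < hi ≤ len arr), so this is exact.
def innerAlt (arr : List Int) (lim : Int) (lo hi : Nat) : Nat :=
  if lo < hi ∧ arr.getD (hi - 1) 0 ≤ lim then
    innerAlt arr (lim - arr.getD (hi - 1) 0) lo (hi - 1)
  else hi
termination_by hi
decreasing_by omega

-- needed by outerAlt's termination
theorem innerAlt_le (arr : List Int) (lim : Int) (lo hi : Nat) : innerAlt arr lim lo hi ≤ hi := by
  fun_induction innerAlt with
  | case1 => omega
  | case2 => omega

def outerAlt (arr : List Int) (limit : Int) (lo hi : Nat) (answer : Int) : Int :=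
  if lo < hi then
    outerAlt arr limit (lo + 1) (innerAlt arr (limit - arr.getD lo 0) (lo + 1) hi) (answer + 1)
  else answer
termination_by hi - lo
decreasing_by
  have := innerAlt_le arr (limit - arr.getD lo 0) (lo + 1) hi
  omega

def solution_alt (people : List Int) (limit : Int) : Int :=
  let arr := PySem.List.sorted people (fun x => x) true
  outerAlt arr limit 0 arr.length 0

-- ===== PRECONDITION & SPEC =====
def Spec_solution (people : List Int) (limit : Int) (out : Int) : Prop := out = solution_alt people limit
instance (people : List Int) (limit : Int) (out : Int) : Decidable (Spec_solution people limit out) := by unfold Spec_solution; infer_instance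

-- ===== CLAIM (what is proved, stated in full; the proofs are below) =====
def Claim_equal_solution : Prop := ∀ (people : List Int) (limit : Int), Dom_solution people limit → Spec_solution people limit (solution people limit)

-- ===== LEMMAS AND PROOFS =====

-- the segment arr[lo:hi] of B's pointers, as the list A still holds
theorem seg_cons (arr : List Int) (lo hi : Nat) (h1 : lo < hi) (h2 : hi ≤ arr.length) :
    (arr.drop lo).take (hi - lo) = arr.getD lo 0 :: (arr.drop (lo + 1)).take (hi - (lo + 1)) := by
  have hlo : lo < arr.length := lt_of_lt_of_le h1 h2
  rw [List.drop_eq_getElem_cons hlo]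
  have : hi - lo = (hi - (lo + 1)) + 1 := by omega
  rw [this, List.take_succ_cons, List.getD_eq_getElem arr 0 hlo]

theorem seg_getLast (arr : List Int) (lo hi : Nat) (h1 : lo < hi) (h2 : hi ≤ arr.length) :
    ((arr.drop lo).take (hi - lo)).getLast? = some (arr.getD (hi - 1) 0) := by
  have hlen : ((arr.drop lo).take (hi - lo)).length = hi - lo := by
    simp [List.length_take, List.length_drop]; omega
  rw [List.getLast?_eq_getElem?, hlen]
  have hidx : hi - lo - 1 < hi - lo := by omega
  rw [List.getElem?_take_of_lt hidx, List.getElem?_drop]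
  have : lo + (hi - lo - 1) = hi - 1 := by omega
  rw [this, List.getD_eq_getElem?_getD]
  have : hi - 1 < arr.length := by omega
  simp [List.getElem?_eq_getElem this]

theorem seg_dropLast (arr : List Int) (lo hi : Nat) (h2 : hi ≤ arr.length) :
    ((arr.drop lo).take (hi - lo)).dropLast = (arr.drop lo).take (hi - 1 - lo) := by
  rw [List.dropLast_eq_take]
  rw [List.take_take]
  congr 1
  simp [List.length_take, List.length_drop]
  omega

theorem inner_eq (arr : List Int) : ∀ hi lim lo, lo ≤ hi → hi ≤ arr.length →
    aInner ((arr.drop lo).take (hi - lo)) lim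
      = (arr.drop lo).take (innerAlt arr lim lo hi - lo) := by
  intro hi
  induction hi using Nat.strong_induction_on with
  | _ hi IH =>
    intro lim lo hlo hlen
    by_cases h1 : lo < hi
    · rw [aInner, innerAlt]
      rw [seg_getLast arr lo hi h1 hlen]
      by_cases hx : arr.getD (hi - 1) 0 ≤ lim
      · simp only [hx, if_pos, h1, and_self]
        rw [seg_dropLast arr lo hi hlen]
        have hrec := IH (hi - 1) (by omega) (lim - arr.getD (hi - 1) 0) lo (by omega) (by omega)
        exact hrec
      · rw [List.getD_eq_getElem?_getD] at hx
        simp [hx, h1]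
    · have h0 : hi - lo = 0 := by omega
      rw [innerAlt]
      simp [h0, h1, aInner]

theorem outer_eq (arr : List Int) (limit : Int) : ∀ n lo hi ans, hi - lo ≤ n → hi ≤ arr.length →
    aLoop ((arr.drop lo).take (hi - lo)) limit ans = outerAlt arr limit lo hi ans := by
  intro n
  induction n with
  | zero =>
    intro lo hi ans hn hlen
    have h0 : hi - lo = 0 := by omega
    rw [outerAlt]
    simp [h0, aLoop, show ¬ lo < hi by omega]
  | succ n IH =>
    intro lo hi ans hn hlen
    by_cases h1 : lo < hi
    · rw [seg_cons arr lo hi h1 hlen, aLoop, outerAlt, if_pos h1]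
      rw [inner_eq arr hi (limit - arr.getD lo 0) (lo + 1) (by omega) hlen]
      have hle := innerAlt_le arr (limit - arr.getD lo 0) (lo + 1) hi
      exact IH (lo + 1) (innerAlt arr (limit - arr.getD lo 0) (lo + 1) hi) (ans + 1)
        (by omega) (by omega)
    · have h0 : hi - lo = 0 := by omega
      rw [outerAlt]
      simp [h0, aLoop, h1]

-- ===== VERDICT (by name: the statement is the Claim_ definition above) =====
theorem solution_spec : Claim_equal_solution := by
  intro people limit _
  unfold Spec_solution solution solution_alt
  set arr := PySem.List.sorted people (fun x => x) true with harr
  have := outer_eq arr limit arr.length 0 arr.length 0 (by omega) (by omega)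
  simpa using this
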